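-- pv_equiv track=rewrite | github.com/guangshuqi/tmux-wrapper | tmux_wrapper.py | _trim_output_to_command
-- ===== SOURCE A (Python) =====
-- from typing import Optional, Tuple
--
-- def _trim_output_to_command(output: str, command: Optional[str]) -> str:
--     """
--     Trim output to only show from the command onwards.
--     If command is not found, return the full output.
--     """
--     if not command or not output:
--         return output
--
--     # Find the command in the output
--     lines = output.split('\n')
--     for idx in range(len(lines) - 1, -1, -1):
--         if command in lines[idx]:
--             # Return everything from this line onwards
--             return '\n'.join(lines[idx:])
--
--     # If command not found, return full output
--     return output
-- ===== SOURCE B (Python) =====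
-- from typing import Optional
--
-- def _trim_output_to_command(output: str, command: Optional[str]) -> str:
--     """Trim output from the last line containing command (full output if absent).
--
--     Works directly on the raw string with rfind instead of splitting into lines:
--     a command containing a newline can never match a single line, so return the
--     full output for it; otherwise the last occurrence of command lies inside the
--     last line containing it, and that line starts right after the last newline
--     before the occurrence.
--     """
--     if not command or not output:
--         return output
--     if '\n' in command:
--         return output
--     idx = output.rfind(command)
--     if idx == -1:
--         return output
--     start = output.rfind('\n', 0, idx) + 1
--     return output[start:]
-- ===== Notes on version B (the rewrite author's own statement) =====
-- stated objective: simpler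
-- what changed: B never splits the output into lines: it locates the last occurrence of the command with rfind on the raw string (returning the full output when the command contains a newline, which can never match a single line), finds the last newline before that occurrence with a second rfind, and returns the suffix from there, instead of A's split('\n') + backward indexed scan over the lines + join.
import Mathlib
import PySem

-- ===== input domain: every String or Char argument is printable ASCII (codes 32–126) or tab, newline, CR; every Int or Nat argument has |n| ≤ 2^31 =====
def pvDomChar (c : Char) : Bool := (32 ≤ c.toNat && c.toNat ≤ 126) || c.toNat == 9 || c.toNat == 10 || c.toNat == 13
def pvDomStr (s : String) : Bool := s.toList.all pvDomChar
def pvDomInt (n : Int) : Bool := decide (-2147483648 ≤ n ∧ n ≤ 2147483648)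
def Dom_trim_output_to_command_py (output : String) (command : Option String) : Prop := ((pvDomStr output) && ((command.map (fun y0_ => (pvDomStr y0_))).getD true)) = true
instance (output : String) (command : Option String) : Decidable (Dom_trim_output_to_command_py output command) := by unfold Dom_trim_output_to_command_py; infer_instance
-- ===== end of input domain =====

-- B avoids splitting into lines: it finds the last occurrence of the command with rfind on the
-- raw string and cuts at the last newline before it, instead of A's split + backward line scan + join.


-- ===== PORT A =====
-- 'for idx in range(len(lines)-1, -1, -1)': fuel k means the current index is k-1;
-- lines[idx] is always in range here, so List.getD is exact.
def trimLoopA (c : String) (lines : List String) (output : String) : Nat → String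
  | 0 => output
  | k+1 =>
      if PySem.Str.isIn c (lines.getD k "") then
        PySem.Str.join "\n" (PySem.List.slice lines (some (k : Int)) none)
      else trimLoopA c lines output k

def trim_output_to_command_py (output : String) (command : Option String) : String :=
  match command with
  | none => output                                  -- 'if not command'
  | some c =>
      if c = "" || output = "" then output          -- 'if not command or not output'
      else
        match PySem.Str.split? output "\n" with
        | some lines => trimLoopA c lines output lines.length
        | none => output                            -- unreachable: the separator "\n" is nonempty

-- ===== PORT B =====
def trim_output_to_command_py_alt (output : String) (command : Option String) : String :=
  match command with
  | none => output                                  -- 'if not command'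
  | some c =>
      if c = "" || output = "" then output          -- 'if not command or not output'
      else if PySem.Str.isIn "\n" c then output     -- "if '\n' in command: return output"
      else
        let idx := PySem.Str.rfind output c         -- 'idx = output.rfind(command)'
        if idx = -1 then output
        else                                        -- 'start = output.rfind('\n', 0, idx) + 1'
          PySem.Str.slice output (some (PySem.Str.rfindFrom output "\n" 0 (some idx) + 1)) none

-- ===== PRECONDITION & SPEC =====
def Spec_trim_output_to_command_py (output : String) (command : Option String) (out : String) : Prop := out = trim_output_to_command_py_alt output command
instance (output : String) (command : Option String) (out : String) : Decidable (Spec_trim_output_to_command_py output command out) := by unfold Spec_trim_output_to_command_py; infer_instance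

-- ===== CLAIM (what is proved, stated in full; the proofs are below) =====
def Claim_equal_trim_output_to_command_py : Prop := ∀ (output : String) (command : Option String), Dom_trim_output_to_command_py output command → Spec_trim_output_to_command_py output command (trim_output_to_command_py output command)

-- ===== LEMMAS AND PROOFS =====

-- char-level abstractions of the two results:
-- suffix of the line list starting at the LAST line containing c (none if no line does)
def suffScan (c : List Char) : List (List Char) → Option (List (List Char))
  | [] => none
  | l :: ls =>
      match suffScan c ls with
      | some r => some r
      | none => if PySem.Chars.isIn c l then some (l :: ls) else none

def Ares (c cs : List Char) : List Char :=
  match suffScan c (PySem.Chars.splitOn cs ['\n']) with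
  | some suf => PySem.Chars.join ['\n'] suf
  | none => cs

def Bres (c cs : List Char) : List Char :=
  let k := PySem.Chars.rfind cs c
  if k = -1 then cs
  else PySem.Chars.slice cs (some (PySem.Chars.rfindFrom cs ['\n'] 0 (some k) + 1)) none

-- ---- splitOn structure ----

lemma splitOn_go_acc (fuel : Nat) : ∀ (l cur : List Char) (acc : List (List Char)),
    PySem.Chars.splitOn.go ['\n'] fuel l cur acc
      = acc.reverse ++ PySem.Chars.splitOn.go ['\n'] fuel l cur [] := by
  induction fuel with
  | zero =>
      intro l cur acc
      rw [PySem.Chars.splitOn.go.eq_def, PySem.Chars.splitOn.go.eq_def]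
      simp
  | succ f ih =>
      intro l cur acc
      cases l with
      | nil =>
          rw [PySem.Chars.splitOn.go.eq_def, PySem.Chars.splitOn.go.eq_def]
          simp
      | cons ch rest =>
          rw [PySem.Chars.splitOn.go.eq_def]
          conv_rhs => rw [PySem.Chars.splitOn.go.eq_def]
          by_cases hp : List.isPrefixOf ['\n'] (ch :: rest) = true
          · simp only [hp, if_true]
            rw [ih _ [] (cur.reverse :: acc), ih _ [] [cur.reverse]]
            simp
          · simp only [hp, Bool.false_eq_true, if_false]
            rw [ih rest (ch :: cur) acc]

lemma splitOn_go_no_nl (l : List Char) : ∀ (fuel : Nat) (cur : List Char) (acc : List (List Char)),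
    '\n' ∉ l → l.length ≤ fuel →
    PySem.Chars.splitOn.go ['\n'] fuel l cur acc = ((cur.reverse ++ l) :: acc).reverse := by
  induction l with
  | nil =>
      intro fuel cur acc _ _
      rw [PySem.Chars.splitOn.go.eq_def]
      cases fuel <;> simp
  | cons ch rest ih =>
      intro fuel cur acc hmem hf
      match fuel, hf with
      | f+1, hf =>
        rw [PySem.Chars.splitOn.go.eq_def]
        have hp : List.isPrefixOf ['\n'] (ch :: rest) = false := by
          simp [List.isPrefixOf]
          intro h; exact absurd (h ▸ List.mem_cons_self) hmem
        simp only [hp]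
        rw [ih f (ch :: cur) acc (fun h => hmem (List.mem_cons_of_mem _ h)) (by simp at hf; omega)]
        simp

lemma splitOn_go_split (l₀ : List Char) : ∀ (fuel : Nat) (rest cur : List Char) (acc : List (List Char)),
    '\n' ∉ l₀ → l₀.length + 1 ≤ fuel →
    PySem.Chars.splitOn.go ['\n'] fuel (l₀ ++ '\n' :: rest) cur acc
      = PySem.Chars.splitOn.go ['\n'] (fuel - (l₀.length + 1)) rest [] ((cur.reverse ++ l₀) :: acc) := by
  induction l₀ with
  | nil =>
      intro fuel rest cur acc _ hf
      match fuel, hf with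
      | f+1, _ =>
        rw [PySem.Chars.splitOn.go.eq_def]
        have hp : List.isPrefixOf ['\n'] ('\n' :: rest) = true := by simp [List.isPrefixOf]
        simp [hp]
  | cons ch l ih =>
      intro fuel rest cur acc hmem hf
      match fuel, hf with
      | f+1, hf =>
        rw [PySem.Chars.splitOn.go.eq_def]
        have hp : List.isPrefixOf ['\n'] (ch :: (l ++ '\n' :: rest)) = false := by
          simp [List.isPrefixOf]
          intro h; exact absurd (h ▸ List.mem_cons_self) hmem
        simp only [List.cons_append, hp, if_false, Bool.false_eq_true]
        rw [ih f rest (ch :: cur) acc (fun h => hmem (List.mem_cons_of_mem _ h)) (by simp at hf ⊢; omega)]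
        simp

lemma splitOn_no_nl (cs : List Char) (h : '\n' ∉ cs) :
    PySem.Chars.splitOn cs ['\n'] = [cs] := by
  rw [PySem.Chars.splitOn, splitOn_go_no_nl cs _ _ _ h (by omega)]
  simp

lemma splitOn_cons (l₀ rest : List Char) (h : '\n' ∉ l₀) :
    PySem.Chars.splitOn (l₀ ++ '\n' :: rest) ['\n'] = l₀ :: PySem.Chars.splitOn rest ['\n'] := by
  rw [PySem.Chars.splitOn, splitOn_go_split l₀ _ _ _ _ h (by simp)]
  rw [splitOn_go_acc]
  have : (l₀ ++ '\n' :: rest).length + 1 - (l₀.length + 1) = rest.length + 1 := by simp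
  rw [this]
  simp [PySem.Chars.splitOn]

-- ---- first-newline decomposition and line facts ----

lemma mem_first_nl (cs : List Char) (h : '\n' ∈ cs) :
    ∃ a b, cs = a ++ '\n' :: b ∧ '\n' ∉ a := by
  induction cs with
  | nil => cases h
  | cons ch rest ih =>
      by_cases hch : ch = '\n'
      · exact ⟨[], rest, by simp [hch], by simp⟩
      · have hr : '\n' ∈ rest := by
          rcases List.mem_cons.mp h with h1 | h1
          · exact absurd h1.symm hch
          · exact h1
        obtain ⟨a, b, hab, hna⟩ := ih hr
        exact ⟨ch :: a, b, by simp [hab], by simp [hna]; exact fun h => hch h.symm⟩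

lemma splitOn_ne_nil (cs : List Char) : PySem.Chars.splitOn cs ['\n'] ≠ [] := by
  by_cases h : '\n' ∈ cs
  · obtain ⟨a, b, hab, hna⟩ := mem_first_nl cs h
    rw [hab, splitOn_cons _ _ hna]; simp
  · rw [splitOn_no_nl cs h]; simp

lemma splitOn_mem_no_nl (cs : List Char) : ∀ l ∈ PySem.Chars.splitOn cs ['\n'], '\n' ∉ l := by
  induction hn : cs.length using Nat.strong_induction_on generalizing cs with
  | _ n ih =>
      by_cases h : '\n' ∈ cs
      · obtain ⟨a, b, hab, hna⟩ := mem_first_nl cs h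
        subst hab
        rw [splitOn_cons _ _ hna]
        intro l hl
        rcases List.mem_cons.mp hl with rfl | hl
        · exact hna
        · exact ih b.length (by simp [← hn]; omega) b rfl l hl
      · rw [splitOn_no_nl cs h]
        intro l hl
        simp at hl; subst hl; exact h

lemma join_splitOn (cs : List Char) :
    PySem.Chars.join ['\n'] (PySem.Chars.splitOn cs ['\n']) = cs := by
  induction hn : cs.length using Nat.strong_induction_on generalizing cs with
  | _ n ih =>
      by_cases h : '\n' ∈ cs
      · obtain ⟨a, b, hab, hna⟩ := mem_first_nl cs h
        subst hab
        rw [splitOn_cons _ _ hna]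
        have hb := ih b.length (by simp [← hn]; omega) b rfl
        obtain ⟨x, t, hxt⟩ : ∃ x t, PySem.Chars.splitOn b ['\n'] = x :: t := by
          cases hsp : PySem.Chars.splitOn b ['\n'] with
          | nil => exact absurd hsp (splitOn_ne_nil b)
          | cons x t => exact ⟨x, t, rfl⟩
        rw [hxt]
        rw [hxt] at hb
        have : PySem.Chars.join ['\n'] (a :: x :: t) = a ++ ['\n'] ++ PySem.Chars.join ['\n'] (x :: t) := by
          simp [PySem.Chars.join, List.intercalate]
        rw [this, hb]
        simp
      · rw [splitOn_no_nl cs h, PySem.Chars.join_singleton]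

lemma singleton_prefix_drop (ch : Char) (s : List Char) (j : Nat) :
    [ch] <+: s.drop j ↔ ∃ h : j < s.length, s[j] = ch := by
  constructor
  · intro h
    have hh : (s.drop j).head? = some ch := by
      rcases h with ⟨t, ht⟩
      rw [← ht]; rfl
    rw [List.head?_drop] at hh
    have hj : j < s.length := by
      by_contra hge
      rw [List.getElem?_eq_none (by omega)] at hh
      cases hh
    exact ⟨hj, by rw [List.getElem?_eq_getElem hj] at hh; exact Option.some.inj hh⟩
  · rintro ⟨hj, hch⟩
    rw [List.drop_eq_getElem_cons hj, hch]
    exact ⟨_, rfl⟩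

lemma prefix_of_append_left {c a : List Char} (b : List Char) (h : c <+: a ++ b)
    (hlen : c.length ≤ a.length) : c <+: a := by
  rw [List.prefix_iff_eq_take] at h ⊢
  rw [h, List.take_append_of_le_length hlen]
  simp [List.length_take, Nat.min_eq_left hlen]

lemma occ_left (c l₀ rest : List Char) (j : Nat) (hfit : j + c.length ≤ l₀.length) :
    c <+: (l₀ ++ '\n' :: rest).drop j ↔ c <+: l₀.drop j := by
  rw [List.drop_append_of_le_length (by omega)]
  constructor
  · intro h
    exact prefix_of_append_left _ h (by simp; omega)
  · intro h
    exact h.trans (List.prefix_append _ _)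

lemma occ_right (c l₀ rest : List Char) (j : Nat) :
    c <+: (l₀ ++ '\n' :: rest).drop (l₀.length + 1 + j) ↔ c <+: rest.drop j := by
  have h2 : l₀.length + 1 + j - l₀.length = j + 1 := by omega
  rw [List.drop_append, List.drop_eq_nil_of_le (by omega), h2]
  simp

lemma occ_cross (c l₀ rest : List Char) (hc : c ≠ []) (hnl : '\n' ∉ c) (j : Nat)
    (h : c <+: (l₀ ++ '\n' :: rest).drop j) :
    j + c.length ≤ l₀.length ∨ l₀.length + 1 ≤ j := by
  by_contra hcon
  push Not at hcon
  obtain ⟨h1, h2⟩ := hcon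
  -- j ≤ l₀.length, j + |c| > l₀.length: position l₀.length is inside the occurrence
  have hj : j ≤ l₀.length := by omega
  have hidx : l₀.length - j < c.length := by omega
  have hlen : l₀.length < (l₀ ++ '\n' :: rest).length := by simp
  have hdroplen : l₀.length - j < ((l₀ ++ '\n' :: rest).drop j).length := by
    simp; omega
  have hc1 := h.getElem hidx
  rw [List.getElem_drop] at hc1
  have harith : j + (l₀.length - j) = l₀.length := by omega
  simp only [harith] at hc1
  have hc2 : (l₀ ++ '\n' :: rest)[l₀.length]'hlen = '\n' := by
    rw [List.getElem_append_right (le_refl _)]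
    simp
  rw [hc2] at hc1
  exact hnl (hc1 ▸ List.getElem_mem hidx)

-- ---- occurrence-splitting helpers ----

lemma occ_fit (c l₀ : List Char) (hc : c ≠ []) (j : Nat) (h : c <+: l₀.drop j) :
    j + c.length ≤ l₀.length := by
  have hlen := h.length_le
  rw [List.length_drop] at hlen
  by_cases hj : j ≤ l₀.length
  · omega
  · rw [List.drop_eq_nil_of_le (by omega)] at h
    exact absurd (List.prefix_nil.mp h) hc

lemma occ_split (c l₀ rest : List Char) (hc : c ≠ []) (hnl : '\n' ∉ c) :
    (∃ j, c <+: (l₀ ++ '\n' :: rest).drop j)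
      ↔ (∃ j, c <+: l₀.drop j) ∨ (∃ j, c <+: rest.drop j) := by
  constructor
  · rintro ⟨j, hj⟩
    rcases occ_cross c l₀ rest hc hnl j hj with hfit | hge
    · exact Or.inl ⟨j, (occ_left c l₀ rest j hfit).mp hj⟩
    · right
      refine ⟨j - l₀.length - 1, ?_⟩
      have : j = l₀.length + 1 + (j - l₀.length - 1) := by omega
      rw [this] at hj
      exact (occ_right c l₀ rest _).mp hj
  · rintro (⟨j, hj⟩ | ⟨j, hj⟩)
    · exact ⟨j, (occ_left c l₀ rest j (occ_fit c l₀ hc j hj)).mpr hj⟩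
    · exact ⟨l₀.length + 1 + j, (occ_right c l₀ rest j).mpr hj⟩

lemma isIn_iff_line (c : List Char) (hc : c ≠ []) (hnl : '\n' ∉ c) :
    ∀ cs, (∃ l ∈ PySem.Chars.splitOn cs ['\n'], PySem.Chars.isIn c l = true)
      ↔ PySem.Chars.isIn c cs = true := by
  intro cs
  induction hn : cs.length using Nat.strong_induction_on generalizing cs with
  | _ n ih =>
      by_cases h : '\n' ∈ cs
      · obtain ⟨l₀, rest, rfl, hna⟩ := mem_first_nl cs h
        rw [splitOn_cons l₀ rest hna]
        rw [← PySem.Chars.exists_prefix_drop_iff_isIn, occ_split c l₀ rest hc hnl,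
          PySem.Chars.exists_prefix_drop_iff_isIn, PySem.Chars.exists_prefix_drop_iff_isIn]
        rw [← ih rest.length (by simp [← hn]; omega) rest rfl]
        simp
      · rw [splitOn_no_nl cs h]
        simp

-- ---- rfind characterisation ----

lemma rfind_go_spec (s c : List Char) (n : Nat) :
    (PySem.Chars.rfind.go s c n = -1 ∧ ∀ j ≤ n, ¬ c <+: s.drop j) ∨
    (∃ k : Nat, k ≤ n ∧ PySem.Chars.rfind.go s c n = (k : Int) ∧ c <+: s.drop k ∧
      ∀ i, k < i → i ≤ n → ¬ c <+: s.drop i) := by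
  induction n with
  | zero =>
      rw [PySem.Chars.rfind.go.eq_def]
      by_cases hp : c.isPrefixOf s = true
      · right
        exact ⟨0, le_refl _, by simp [hp], by simpa using List.isPrefixOf_iff_prefix.mp hp,
          fun i hi hi' _ => absurd (le_antisymm hi' hi.le) (by omega)⟩
      · left
        refine ⟨by simp [hp], fun j hj => ?_⟩
        interval_cases j
        simpa using fun h => hp (List.isPrefixOf_iff_prefix.mpr h)
  | succ m ih =>
      rw [PySem.Chars.rfind.go.eq_def]
      by_cases hp : c.isPrefixOf (s.drop (m+1)) = true
      · right
        exact ⟨m+1, le_refl _, by simp [hp], List.isPrefixOf_iff_prefix.mp hp,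
          fun i hi hi' => absurd rfl (by omega : ¬ (0:Nat) = 0)⟩
      · simp only [hp, Bool.false_eq_true, if_false]
        have hnp : ¬ c <+: s.drop (m+1) := fun h => hp (List.isPrefixOf_iff_prefix.mpr h)
        rcases ih with ⟨h1, h2⟩ | ⟨k, hk, heq, hpre, hmax⟩
        · left
          refine ⟨h1, fun j hj => ?_⟩
          rcases Nat.lt_or_ge j (m+1) with hlt | hge
          · exact h2 j (by omega)
          · have : j = m+1 := by omega
            exact this ▸ hnp
        · right
          refine ⟨k, by omega, heq, hpre, fun i hi hi' => ?_⟩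
          rcases Nat.lt_or_ge i (m+1) with hlt | hge
          · exact hmax i hi (by omega)
          · have : i = m+1 := by omega
            exact this ▸ hnp

lemma rfind_cases (s c : List Char) (hc : c ≠ []) :
    (PySem.Chars.rfind s c = -1 ∧ ∀ j, ¬ c <+: s.drop j) ∨
    (∃ k : Nat, k ≤ s.length ∧ PySem.Chars.rfind s c = (k : Int) ∧ c <+: s.drop k ∧
      ∀ i, k < i → ¬ c <+: s.drop i) := by
  have hbig : ∀ j, s.length < j → ¬ c <+: s.drop j := by
    intro j hj h
    rw [List.drop_eq_nil_of_le (by omega)] at h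
    exact hc (List.prefix_nil.mp h)
  rcases rfind_go_spec s c s.length with ⟨h1, h2⟩ | ⟨k, hk, heq, hpre, hmax⟩
  · left
    refine ⟨h1, fun j => ?_⟩
    rcases Nat.lt_or_ge s.length j with hlt | hge
    · exact hbig j hlt
    · exact h2 j hge
  · right
    refine ⟨k, hk, heq, hpre, fun i hi => ?_⟩
    rcases Nat.lt_or_ge s.length i with hlt | hge
    · exact hbig i hlt
    · exact hmax i hi hge

lemma rfind_eq_of (s c : List Char) (k : Nat) (hk : c <+: s.drop k)
    (hmax : ∀ i, k < i → ¬ c <+: s.drop i) (hlen : k ≤ s.length) :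
    PySem.Chars.rfind s c = (k : Int) := by
  have hc : c ≠ [] := by
    intro h
    exact hmax (k+1) (by omega) (by simp [h])
  rcases rfind_cases s c hc with ⟨_, h2⟩ | ⟨k', _, heq, hpre, hmax'⟩
  · exact absurd hk (h2 k)
  · rcases Nat.lt_trichotomy k k' with h | h | h
    · exact absurd hpre (hmax k' h)
    · rw [heq, h]
    · exact absurd hk (hmax' k h)

lemma rfind_eq_neg_one (s c : List Char) (h : ∀ j, ¬ c <+: s.drop j) :
    PySem.Chars.rfind s c = -1 := by
  rcases rfind_go_spec s c s.length with ⟨h1, _⟩ | ⟨k, _, _, hpre, _⟩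
  · exact h1
  · exact absurd hpre (h k)

lemma rfind_nl_none (t : List Char) (h : '\n' ∉ t) :
    PySem.Chars.rfind t ['\n'] = -1 := by
  refine rfind_eq_neg_one t ['\n'] (fun j hj => ?_)
  obtain ⟨hlt, hch⟩ := (singleton_prefix_drop '\n' t j).mp hj
  exact h (hch ▸ List.getElem_mem hlt)

lemma rfind_nl_sep (l₀ t : List Char) (h0 : '\n' ∉ l₀) (ht : '\n' ∉ t) :
    PySem.Chars.rfind (l₀ ++ '\n' :: t) ['\n'] = (l₀.length : Int) := by
  refine rfind_eq_of _ _ l₀.length ?_ ?_ (by simp)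
  · rw [List.drop_append_of_le_length (le_refl _)]
    simp
  · intro i hi hp
    obtain ⟨hlt, hch⟩ := (singleton_prefix_drop _ _ _).mp hp
    have : (l₀ ++ '\n' :: t)[i] = ('\n' :: t)[i - l₀.length]'(by simp at hlt ⊢; omega) :=
      List.getElem_append_right (by omega)
    rw [this] at hch
    have hpos : 1 ≤ i - l₀.length := by omega
    have : ('\n' :: t)[i - l₀.length]'(by simp at hlt ⊢; omega) = t[i - l₀.length - 1]'(by simp at hlt ⊢; omega) := by
      rw [List.getElem_cons]
      simp [Nat.ne_of_gt hpos]
    rw [this] at hch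
    exact ht (hch ▸ List.getElem_mem _)

lemma rfind_nl_right (l₀ t : List Char) (ht : '\n' ∈ t) :
    PySem.Chars.rfind (l₀ ++ '\n' :: t) ['\n'] = (l₀.length : Int) + 1 + PySem.Chars.rfind t ['\n'] := by
  have hex : ∃ j, ['\n'] <+: t.drop j := by
    obtain ⟨a, b, rfl⟩ := List.append_of_mem ht
    exact ⟨a.length, by rw [List.drop_append_of_le_length (le_refl _)]; simp⟩
  rcases rfind_cases t ['\n'] (by simp) with ⟨_, h2⟩ | ⟨k, hk, heq, hpre, hmax⟩
  · obtain ⟨j, hj⟩ := hex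
    exact absurd hj (h2 j)
  · rw [heq]
    have : (l₀.length : Int) + 1 + (k : Int) = ((l₀.length + 1 + k : Nat) : Int) := by push_cast; ring
    rw [this]
    refine rfind_eq_of _ _ _ ?_ ?_ (by simp; omega)
    · exact (occ_right _ l₀ t k).mpr hpre
    · intro i hi hp
      obtain ⟨hlt, _⟩ := (singleton_prefix_drop _ _ _).mp hp
      have hge : l₀.length + 1 ≤ i := by omega
      have hi' : i = l₀.length + 1 + (i - l₀.length - 1) := by omega
      rw [hi', occ_right _ l₀ t _] at hp
      exact hmax _ (by omega) hp

lemma rfindFrom_take (s sub : List Char) (k : Nat) (hk : k ≤ s.length) :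
    PySem.Chars.rfindFrom s sub 0 (some (k : Int)) = PySem.Chars.rfind (s.take k) sub := by
  rw [PySem.Chars.rfindFrom]
  have h1 : ¬ ((s.length : Int) < (k : Int)) := by exact_mod_cast not_lt.mpr hk
  have h2 : ¬ ((k : Int) < 0) := by exact_mod_cast Nat.not_lt_zero k
  simp only [h1, if_false, h2]
  norm_num
  by_cases h : PySem.Chars.rfind (List.take k s) sub = -1
  · simp [h]
  · simp [h]

-- ---- suffScan facts ----

lemma suffScan_none_iff (c : List Char) (ls : List (List Char)) :
    suffScan c ls = none ↔ ∀ l ∈ ls, PySem.Chars.isIn c l = false := by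
  induction ls with
  | nil => simp [suffScan]
  | cons l ls ih =>
      rw [suffScan]
      cases h : suffScan c ls with
      | some r =>
          simp only []
          constructor
          · intro h'; cases h'
          · intro hall
            have := ih.mpr (fun x hx => hall x (List.mem_cons_of_mem _ hx))
            rw [h] at this; cases this
      | none =>
          by_cases hc : PySem.Chars.isIn c l
          · simp [hc]
          · simp only [hc, Bool.false_eq_true, if_false]
            constructor
            · intro _ x hx
              rcases List.mem_cons.mp hx with rfl | hx
              · exact Bool.eq_false_iff.mpr hc
              · exact (ih.mp h) x hx
            · intro _; trivial

lemma suffScan_append (c : List Char) (xs : List (List Char)) (x : List Char) :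
    suffScan c (xs ++ [x])
      = if PySem.Chars.isIn c x then some [x] else (suffScan c xs).map (· ++ [x]) := by
  induction xs with
  | nil =>
      rw [List.nil_append, suffScan]
      simp [suffScan]
  | cons l ls ih =>
      rw [List.cons_append, suffScan, ih, suffScan]
      by_cases hx : PySem.Chars.isIn c x
      · simp [hx]
      · simp only [hx, Bool.false_eq_true, if_false]
        cases h : suffScan c ls with
        | some r => simp
        | none =>
            by_cases hl : PySem.Chars.isIn c l <;> simp [hl]

-- take / drop across the first separator
lemma take_sep (l₀ rest : List Char) (i : Nat) :
    (l₀ ++ '\n' :: rest).take (l₀.length + 1 + i) = l₀ ++ '\n' :: rest.take i := by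
  rw [List.take_append]
  rw [List.take_of_length_le (by omega)]
  congr 1
  have : l₀.length + 1 + i - l₀.length = i + 1 := by omega
  rw [this]
  rfl

lemma drop_sep (l₀ rest : List Char) (i : Nat) :
    (l₀ ++ '\n' :: rest).drop (l₀.length + 1 + i) = rest.drop i := by
  rw [List.drop_append, List.drop_eq_nil_of_le (by omega)]
  have : l₀.length + 1 + i - l₀.length = i + 1 := by omega
  rw [this]
  rfl

lemma mem_nl_ex (t : List Char) (ht : '\n' ∈ t) : ∃ j, ['\n'] <+: t.drop j := by
  obtain ⟨a, b, rfl⟩ := List.append_of_mem ht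
  exact ⟨a.length, by rw [List.drop_append_of_le_length (le_refl _)]; simp⟩

-- slice with a non-negative cast start is drop
lemma slice_natCast' (cs : List Char) (m : Nat) :
    PySem.Chars.slice cs (some ((m : Nat) : Int)) none = cs.drop m := by
  rw [PySem.Chars.slice_eq_listSlice, PySem.List.slice_from_natCast]

lemma Bres_no_nl (c cs : List Char) (hc : c ≠ []) (hnlcs : '\n' ∉ cs) :
    Bres c cs = cs := by
  unfold Bres
  rcases rfind_cases cs c hc with ⟨h1, _⟩ | ⟨k, hk, heq, _, _⟩
  · simp [h1]
  · rw [heq]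
    have hne : (k : Int) ≠ -1 := by omega
    simp only [hne, if_false]
    rw [rfindFrom_take cs ['\n'] k hk, rfind_nl_none _ (fun h => hnlcs (List.mem_of_mem_take h))]
    norm_num

lemma Bres_right (c l₀ rest : List Char) (hc : c ≠ []) (hnl : '\n' ∉ c) (hna : '\n' ∉ l₀)
    (hex : ∃ j, c <+: rest.drop j) :
    Bres c (l₀ ++ '\n' :: rest) = Bres c rest := by
  rcases rfind_cases rest c hc with ⟨h1, h2⟩ | ⟨k', hk', heq', hpre', hmax'⟩
  · obtain ⟨j, hj⟩ := hex; exact absurd hj (h2 j)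
  have hwhole : PySem.Chars.rfind (l₀ ++ '\n' :: rest) c = ((l₀.length + 1 + k' : Nat) : Int) := by
    refine rfind_eq_of _ _ _ ((occ_right c l₀ rest k').mpr hpre') ?_ (by simp; omega)
    intro i hi hp
    rcases occ_cross c l₀ rest hc hnl i hp with hfit | hge
    · omega
    · have hieq : i = l₀.length + 1 + (i - l₀.length - 1) := by omega
      rw [hieq, occ_right] at hp
      exact hmax' _ (by omega) hp
  unfold Bres
  rw [hwhole, heq']
  have hne1 : ((l₀.length + 1 + k' : Nat) : Int) ≠ -1 := by omega
  have hne2 : (k' : Int) ≠ -1 := by omega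
  simp only [hne1, hne2, if_false]
  rw [rfindFrom_take _ _ _ (by simp; omega), rfindFrom_take _ _ _ hk', take_sep l₀ rest k']
  by_cases hnt : '\n' ∈ rest.take k'
  · rw [rfind_nl_right l₀ _ hnt]
    rcases rfind_cases (rest.take k') ['\n'] (by simp) with ⟨h1, h2⟩ | ⟨k'', hk'', heq'', _, _⟩
    · obtain ⟨j, hj⟩ := mem_nl_ex _ hnt; exact absurd hj (h2 j)
    rw [heq'']
    have hc1 : (l₀.length : Int) + 1 + (k'' : Int) + 1 = ((l₀.length + 1 + (k'' + 1) : Nat) : Int) := by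
      push_cast; ring
    have hc2 : (k'' : Int) + 1 = ((k'' + 1 : Nat) : Int) := by push_cast; ring
    rw [hc1, hc2, slice_natCast', slice_natCast', drop_sep]
  · rw [rfind_nl_sep l₀ _ hna hnt, rfind_nl_none _ hnt]
    have hc1 : (l₀.length : Int) + 1 = ((l₀.length + 1 + 0 : Nat) : Int) := by push_cast; ring
    have hc2 : (-1 : Int) + 1 = ((0 : Nat) : Int) := by norm_num
    rw [hc1, hc2, slice_natCast', slice_natCast', drop_sep]

lemma Bres_left (c l₀ rest : List Char) (hc : c ≠ []) (hnl : '\n' ∉ c) (hna : '\n' ∉ l₀)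
    (hnex : ¬ ∃ j, c <+: rest.drop j) :
    Bres c (l₀ ++ '\n' :: rest) = l₀ ++ '\n' :: rest := by
  by_cases hexl : ∃ j, c <+: l₀.drop j
  · rcases rfind_cases l₀ c hc with ⟨h1, h2⟩ | ⟨k₀, hk₀, heq₀, hpre₀, hmax₀⟩
    · obtain ⟨j, hj⟩ := hexl; exact absurd hj (h2 j)
    have hfit := occ_fit c l₀ hc k₀ hpre₀
    have hwhole : PySem.Chars.rfind (l₀ ++ '\n' :: rest) c = (k₀ : Int) := by
      refine rfind_eq_of _ _ _ ((occ_left c l₀ rest k₀ hfit).mpr hpre₀) ?_ (by simp; omega)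
      intro i hi hp
      rcases occ_cross c l₀ rest hc hnl i hp with hfit' | hge
      · exact hmax₀ i hi ((occ_left c l₀ rest i hfit').mp hp)
      · have hieq : i = l₀.length + 1 + (i - l₀.length - 1) := by omega
        rw [hieq, occ_right] at hp
        exact hnex ⟨_, hp⟩
    unfold Bres
    rw [hwhole]
    have hne : (k₀ : Int) ≠ -1 := by omega
    simp only [hne, if_false]
    rw [rfindFrom_take _ _ _ (by simp; omega), List.take_append_of_le_length (by omega)]
    rw [rfind_nl_none _ (fun h => hna (List.mem_of_mem_take h))]
    have hc2 : (-1 : Int) + 1 = ((0 : Nat) : Int) := by norm_num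
    rw [hc2, slice_natCast']
    simp
  · have hnone : PySem.Chars.rfind (l₀ ++ '\n' :: rest) c = -1 := by
      refine rfind_eq_neg_one _ _ (fun j hj => ?_)
      rcases (occ_split c l₀ rest hc hnl).mp ⟨j, hj⟩ with h | h
      · exact hexl h
      · exact hnex h
    unfold Bres
    simp [hnone]

lemma Ares_right (c l₀ rest : List Char) (hc : c ≠ []) (hnl : '\n' ∉ c) (hna : '\n' ∉ l₀)
    (hPrest : PySem.Chars.isIn c rest = true) :
    Ares c (l₀ ++ '\n' :: rest) = Ares c rest := by
  unfold Ares
  rw [splitOn_cons l₀ rest hna]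
  have hne : suffScan c (PySem.Chars.splitOn rest ['\n']) ≠ none := by
    intro hnone
    obtain ⟨l, hl, hl2⟩ := (isIn_iff_line c hc hnl rest).mpr hPrest
    have := (suffScan_none_iff c _).mp hnone l hl
    rw [hl2] at this; cases this
  cases hscan : suffScan c (PySem.Chars.splitOn rest ['\n']) with
  | none => exact absurd hscan hne
  | some r => rw [suffScan, hscan]

lemma Ares_left (c l₀ rest : List Char) (hc : c ≠ []) (hnl : '\n' ∉ c) (hna : '\n' ∉ l₀)
    (hPrest : ¬ PySem.Chars.isIn c rest = true) :
    Ares c (l₀ ++ '\n' :: rest) = l₀ ++ '\n' :: rest := by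
  unfold Ares
  rw [splitOn_cons l₀ rest hna]
  have hnone : suffScan c (PySem.Chars.splitOn rest ['\n']) = none := by
    rw [suffScan_none_iff]
    intro l hl
    rw [Bool.eq_false_iff]
    intro hl2
    exact hPrest ((isIn_iff_line c hc hnl rest).mp ⟨l, hl, hl2⟩)
  rw [suffScan, hnone]
  by_cases hl₀ : PySem.Chars.isIn c l₀ = true
  · simp only [hl₀, if_true]
    have := join_splitOn (l₀ ++ '\n' :: rest)
    rw [splitOn_cons l₀ rest hna] at this
    exact this
  · simp [hl₀]

lemma Ares_no_nl (c cs : List Char) (hnlcs : '\n' ∉ cs) : Ares c cs = cs := by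
  unfold Ares
  rw [splitOn_no_nl cs hnlcs]
  rw [suffScan, suffScan]
  by_cases h : PySem.Chars.isIn c cs = true
  · simp [h, PySem.Chars.join_singleton]
  · simp [h]

lemma core (c : List Char) (hc : c ≠ []) (hnl : '\n' ∉ c) :
    ∀ cs, Ares c cs = Bres c cs := by
  intro cs
  induction hn : cs.length using Nat.strong_induction_on generalizing cs with
  | _ n ih =>
      by_cases h : '\n' ∈ cs
      · obtain ⟨l₀, rest, rfl, hna⟩ := mem_first_nl cs h
        by_cases hPrest : PySem.Chars.isIn c rest = true
        · rw [Ares_right c l₀ rest hc hnl hna hPrest,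
            Bres_right c l₀ rest hc hnl hna
              ((PySem.Chars.exists_prefix_drop_iff_isIn c rest).mpr hPrest)]
          exact ih rest.length (by simp [← hn]; omega) rest rfl
        · rw [Ares_left c l₀ rest hc hnl hna hPrest,
            Bres_left c l₀ rest hc hnl hna
              (fun hex => hPrest ((PySem.Chars.exists_prefix_drop_iff_isIn c rest).mp hex))]
      · rw [Ares_no_nl c cs h, Bres_no_nl c cs hc h]

-- ---- bridging the ports to Ares / Bres ----

lemma join_ofList (suf : List (List Char)) :
    PySem.Str.join "\n" (suf.map String.ofList) = String.ofList (PySem.Chars.join ['\n'] suf) := by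
  rw [PySem.Str.join]
  congr 1
  · rw [List.map_map]
    have : (String.toList ∘ String.ofList) = id := funext (fun l => String.toList_ofList)
    rw [this, List.map_id]
    have h : ("\n" : String).toList = ['\n'] := by decide
    rw [h]

lemma trimLoopA_eq (c : String) (cls : List (List Char)) (out : String) :
    ∀ k, k ≤ cls.length →
      trimLoopA c (cls.map String.ofList) out k
        = match suffScan c.toList (cls.take k) with
          | some suf => PySem.Str.join "\n" ((suf ++ cls.drop k).map String.ofList)
          | none => out := by
  intro k
  induction k with
  | zero => intro _; simp [trimLoopA, suffScan]
  | succ k ih =>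
      intro hk
      have hklt : k < cls.length := by omega
      have htake : cls.take (k+1) = cls.take k ++ [cls[k]] :=
        List.take_succ_eq_append_getElem hklt
      rw [trimLoopA, htake, suffScan_append]
      have hgetD : (cls.map String.ofList).getD k "" = String.ofList cls[k] := by
        rw [List.getD_eq_getElem?_getD, List.getElem?_map, List.getElem?_eq_getElem hklt]
        rfl
      rw [hgetD]
      have hisin : PySem.Str.isIn c (String.ofList cls[k])
          = PySem.Chars.isIn c.toList cls[k] := by
        rw [PySem.Str.isIn_eq, String.toList_ofList]
      rw [hisin]
      by_cases hp : PySem.Chars.isIn c.toList cls[k] = true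
      · simp only [hp, if_true]
        rw [PySem.List.slice_from_natCast, ← List.map_drop,
          List.drop_eq_getElem_cons hklt]
        rfl
      · simp only [hp, Bool.false_eq_true, if_false]
        rw [ih (by omega)]
        cases hscan : suffScan c.toList (cls.take k) with
        | none => rfl
        | some suf =>
            simp only [Option.map_some]
            congr 1
            rw [List.append_assoc, List.singleton_append,
              ← List.drop_eq_getElem_cons hklt]

lemma split?_char (out : String) :
    PySem.Str.split? out "\n"
      = some ((PySem.Chars.splitOn out.toList ['\n']).map String.ofList) := by
  rw [PySem.Str.split?, PySem.Chars.split?]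
  have : ("\n" : String).toList = ['\n'] := by decide
  rw [this]
  simp

lemma portA_char (c out : String) (hc : ¬ (c = "" || out = "") = true) :
    trim_output_to_command_py out (some c) = String.ofList (Ares c.toList out.toList) := by
  rw [trim_output_to_command_py]
  simp only [hc, Bool.false_eq_true, if_false]
  rw [split?_char]
  show trimLoopA c ((PySem.Chars.splitOn out.toList ['\n']).map String.ofList) out
      ((PySem.Chars.splitOn out.toList ['\n']).map String.ofList).length
    = String.ofList (Ares c.toList out.toList)
  have hlen : ((PySem.Chars.splitOn out.toList ['\n']).map String.ofList).length
      = (PySem.Chars.splitOn out.toList ['\n']).length := by simp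
  rw [hlen, trimLoopA_eq c _ out _ (le_refl _), List.take_length]
  rw [Ares]
  cases hscan : suffScan c.toList (PySem.Chars.splitOn out.toList ['\n']) with
  | none => simp [String.ofList_toList]
  | some suf =>
      simp only []
      rw [List.drop_length, List.append_nil, join_ofList]

lemma portB_char (c out : String) (hc : ¬ (c = "" || out = "") = true)
    (hnl : ¬ PySem.Str.isIn "\n" c = true) :
    trim_output_to_command_py_alt out (some c) = String.ofList (Bres c.toList out.toList) := by
  rw [trim_output_to_command_py_alt]
  simp only [hc, hnl, Bool.false_eq_true, if_false]
  rw [Bres]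
  simp only [PySem.Str.rfind_eq]
  by_cases hk : PySem.Chars.rfind out.toList c.toList = -1
  · simp [hk, String.ofList_toList]
  · simp only [hk, if_false]
    have hstr : ("\n" : String).toList = ['\n'] := by decide
    rw [PySem.Str.slice, PySem.Str.rfindFrom_eq, hstr]

-- ---- the final case: a command containing a newline matches no line ----

lemma nl_mem_of_isIn (l : List Char) (h : PySem.Chars.isIn ['\n'] l = true) : '\n' ∈ l :=
  List.singleton_sublist.mp ((PySem.Chars.isIn_iff_infix _ _).mp h).sublist

lemma Ares_nl_cmd (c cs : List Char) (hmem : '\n' ∈ c) : Ares c cs = cs := by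
  unfold Ares
  have hnone : suffScan c (PySem.Chars.splitOn cs ['\n']) = none := by
    rw [suffScan_none_iff]
    intro l hl
    rw [Bool.eq_false_iff]
    intro htrue
    exact splitOn_mem_no_nl cs l hl
      (((PySem.Chars.isIn_iff_infix _ _).mp htrue).sublist.mem hmem)
  rw [hnone]

lemma toList_ne_nil (c : String) (h : c ≠ "") : c.toList ≠ [] := by
  intro hnil
  apply h
  have := String.ofList_toList (s := c)
  rw [hnil] at this
  exact this.symm

-- ===== VERDICT (by name: the statement is the Claim_ definition above) =====
theorem trim_output_to_command_py_spec : Claim_equal_trim_output_to_command_py := by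
  intro output command _
  unfold Spec_trim_output_to_command_py
  cases command with
  | none => rfl
  | some c =>
      by_cases hg : (c = "" || output = "") = true
      · rw [trim_output_to_command_py, trim_output_to_command_py_alt]
        simp only [hg, if_true]
      · by_cases hnlc : PySem.Str.isIn "\n" c = true
        · rw [portA_char c output hg]
          have hmem : '\n' ∈ c.toList := by
            rw [PySem.Str.isIn_eq] at hnlc
            have h : ("\n" : String).toList = ['\n'] := by decide
            rw [h] at hnlc
            exact nl_mem_of_isIn _ hnlc
          rw [Ares_nl_cmd c.toList output.toList hmem, String.ofList_toList]
          rw [trim_output_to_command_py_alt]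
          simp only [hg, Bool.false_eq_true, if_false, hnlc, if_true]
        · have hcne : c ≠ "" := by
            intro h
            rw [h] at hg
            simp at hg
          have hc' : c.toList ≠ [] := toList_ne_nil c hcne
          have hnl' : '\n' ∉ c.toList := by
            intro hmem
            apply hnlc
            rw [PySem.Str.isIn_eq]
            have h : ("\n" : String).toList = ['\n'] := by decide
            rw [h, PySem.Chars.isIn_iff_infix]
            obtain ⟨a, b, hab⟩ := List.append_of_mem hmem
            exact ⟨a, b, by rw [hab]; simp⟩
          rw [portA_char c output hg, portB_char c output hg hnlc,
            core c.toList hc' hnl' output.toList]
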